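-- pv_equiv track=rewrite | github.com/Saurabh5233/5th-sem-DAA | Sorting/Assignments/Q12.py | buyChocolates
-- ===== SOURCE A (Python) =====
-- from typing import List
--
-- def buyChocolates(prices: List[int], money: int) -> int:
--     # Step 1: Sort the prices array
--     prices.sort()
--
--     # Initialize the minimum leftover money to the initial amount of money
--     min_leftover = money
--
--     n = len(prices)
--     found = False
--     for i in range(n - 1):
--         for j in range(i + 1, n):
--             total_cost = prices[i] + prices[j]
--             if total_cost <= money:
--                 min_leftover = min(min_leftover, money - total_cost)
--                 found = True
--             else:
--                 break
--
--     #
--     return min_leftover if found else money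
-- ===== SOURCE B (Python) =====
-- def buyChocolates(prices, money):
--     s = sorted(prices)
--     leftover = money
--     l, r = 0, len(s) - 1
--     while l < r:
--         t = s[l] + s[r]
--         if t <= money:
--             leftover = min(leftover, money - t)
--             l += 1
--         else:
--             r -= 1
--     return leftover
-- ===== Notes on version B (the rewrite author's own statement) =====
-- stated objective: faster
-- what changed: Replaced the nested i/j scan over all pairs (with an early break) by a sort-then-two-pointer sweep that finds the maximal affordable pair sum in one linear pass over the sorted list.
import Mathlib
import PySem

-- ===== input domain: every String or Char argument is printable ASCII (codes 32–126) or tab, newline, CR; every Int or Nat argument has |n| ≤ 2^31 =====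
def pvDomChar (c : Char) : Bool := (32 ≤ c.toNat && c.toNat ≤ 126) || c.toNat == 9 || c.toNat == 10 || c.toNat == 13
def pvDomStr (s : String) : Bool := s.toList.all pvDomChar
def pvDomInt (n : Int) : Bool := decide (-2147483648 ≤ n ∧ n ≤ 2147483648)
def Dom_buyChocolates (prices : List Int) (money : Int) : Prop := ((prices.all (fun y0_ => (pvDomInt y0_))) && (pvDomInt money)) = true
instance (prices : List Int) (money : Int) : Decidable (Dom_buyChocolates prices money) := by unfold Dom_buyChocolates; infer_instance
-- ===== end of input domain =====

-- B replaces A's nested pair scan by a sort-then-two-pointer sweep (measured faster, asymptotic);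
-- A sorts its argument in place (a side effect B does not have): the equivalence proved here is about the return value.

-- ===== PORT A =====
-- inner loop 'for j in range(i+1, n): … else break', state (min_leftover, found)
def innerA (S : List Int) (money x n : Int) (j : Int) (st : Int × Bool) : Int × Bool :=
  if _h : j < n then
    let total := x + PySem.List.pyGetD S j 0
    if total ≤ money then
      innerA S money x n (j + 1) (min st.1 (money - total), true)
    else st
  else st
termination_by (n - j).toNat
decreasing_by omega

def buyChocolates (prices : List Int) (money : Int) : Int :=
  let S := PySem.List.sorted prices (fun v => v) false
  let n : Int := S.length
  let st := (PySem.List.pyRange 0 (n - 1) 1).foldl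
      (fun st i => innerA S money (PySem.List.pyGetD S i 0) n (i + 1) st) (money, false)
  if st.2 then st.1 else money

-- ===== PORT B =====
-- two-pointer sweep 'while l < r: …' over the sorted list, tracking the best leftover
def tpLoop (S : List Int) (money : Int) (l r : Int) (leftover : Int) : Int :=
  if h : l < r then
    let t := PySem.List.pyGetD S l 0 + PySem.List.pyGetD S r 0
    if t ≤ money then tpLoop S money (l + 1) r (min leftover (money - t))
    else tpLoop S money l (r - 1) leftover
  else leftover
termination_by (r - l).toNat
decreasing_by all_goals omega

def buyChocolates_alt (prices : List Int) (money : Int) : Int :=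
  let s := PySem.List.sorted prices (fun v => v) false
  tpLoop s money 0 ((s.length : Int) - 1) money

-- ===== PRECONDITION & SPEC =====
def Spec_buyChocolates (prices : List Int) (money : Int) (out : Int) : Prop := out = buyChocolates_alt prices money
instance (prices : List Int) (money : Int) (out : Int) : Decidable (Spec_buyChocolates prices money out) := by unfold Spec_buyChocolates; infer_instance

-- ===== CLAIM (what is proved, stated in full; the proofs are below) =====
def Claim_equal_buyChocolates : Prop := ∀ (prices : List Int) (money : Int), Dom_buyChocolates prices money → Spec_buyChocolates prices money (buyChocolates prices money)

-- ===== LEMMAS AND PROOFS =====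

-- reference fold: one row (all pairs with fixed first element x, no break)
def specRow (money x : Int) (ys : List Int) (a : Int) : Int :=
  ys.foldl (fun a y => if x + y ≤ money then min a (money - (x + y)) else a) a

-- reference fold: all pairs of S, in A's (i ascending, j ascending) order
def specPairs (money : Int) : List Int → Int → Int
  | [], a => a
  | x :: xs, a => specPairs money xs (specRow money x xs a)

-- structural version of A's inner loop with break
def rowBreak (money x : Int) : List Int → Int × Bool → Int × Bool
  | [], st => st
  | y :: ys, st =>
    if x + y ≤ money then rowBreak money x ys (min st.1 (money - (x + y)), true) else st

def pairsBreak (money : Int) : List Int → Int × Bool → Int × Bool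
  | [], st => st
  | x :: xs, st => pairsBreak money xs (rowBreak money x xs st)

theorem specRow_cons (money x y a : Int) (ys : List Int) :
    specRow money x (y :: ys) a =
      specRow money x ys (if x + y ≤ money then min a (money - (x + y)) else a) := rfl

theorem specRow_of_infeasible (money x : Int) (ys : List Int) (a : Int)
    (h : ∀ y ∈ ys, ¬ (x + y ≤ money)) : specRow money x ys a = a := by
  induction ys with
  | nil => rfl
  | cons y ys ih =>
    rw [specRow_cons, if_neg (h y (by simp))]
    exact ih (fun z hz => h z (by simp [hz]))

-- min with a dominated row collapses: every feasible value in ys is ≥ M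
theorem min_specRow (money x M : Int) (ys : List Int)
    (h : ∀ z ∈ ys, x + z ≤ money → M ≤ money - (x + z)) :
    ∀ a, min (specRow money x ys a) M = min a M := by
  induction ys with
  | nil => intro a; rfl
  | cons z zs ih =>
    intro a
    rw [specRow_cons]
    by_cases hz : x + z ≤ money
    · rw [if_pos hz, ih (fun w hw => h w (by simp [hw]))]
      have hM : M ≤ money - (x + z) := h z (by simp) hz
      omega
    · rw [if_neg hz]
      exact ih (fun w hw => h w (by simp [hw])) a

-- on a sorted row ending in y with x + y affordable, the whole row collapses to that pair
theorem specRow_last (money x y : Int) (ys : List Int)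
    (hp : (ys ++ [y]).Pairwise (· ≤ ·)) (hf : x + y ≤ money) (a : Int) :
    specRow money x (ys ++ [y]) a = min a (money - (x + y)) := by
  have hble : ∀ z ∈ ys, z ≤ y := by
    have := (List.pairwise_append.mp hp).2.2
    intro z hz; exact this z hz y (by simp)
  have : specRow money x (ys ++ [y]) a = min (specRow money x ys a) (money - (x + y)) := by
    unfold specRow
    rw [List.foldl_append]
    simp [hf]
  rw [this]
  exact min_specRow money x _ ys (fun z hz hzf => by have := hble z hz; omega) a

-- dropping an unaffordable last element from the pair fold
theorem specPairs_drop_last (money y : Int) (ws : List Int)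
    (h : ∀ z ∈ ws, ¬ (z + y ≤ money)) (a : Int) :
    specPairs money (ws ++ [y]) a = specPairs money ws a := by
  induction ws generalizing a with
  | nil => rfl
  | cons w ws ih =>
    show specPairs money (ws ++ [y]) (specRow money w (ws ++ [y]) a)
        = specPairs money ws (specRow money w ws a)
    have hrow : specRow money w (ws ++ [y]) a = specRow money w ws a := by
      unfold specRow
      rw [List.foldl_append]
      simp [h w (by simp)]
    rw [hrow, ih (fun z hz => h z (by simp [hz]))]

-- ===== A-side characterisation =====

theorem rowBreak_snd_true (money x : Int) (ys : List Int) (st : Int × Bool)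
    (h : st.2 = true) : (rowBreak money x ys st).2 = true := by
  induction ys generalizing st with
  | nil => exact h
  | cons y ys ih =>
    unfold rowBreak
    split_ifs with hf
    · exact ih _ rfl
    · exact h

theorem rowBreak_of_snd_false (money x : Int) (ys : List Int) (st : Int × Bool)
    (h : (rowBreak money x ys st).2 = false) : rowBreak money x ys st = st := by
  induction ys generalizing st with
  | nil => rfl
  | cons y ys ih =>
    unfold rowBreak at h ⊢
    split_ifs at h ⊢ with hf
    · have ht := rowBreak_snd_true money x ys (min st.1 (money - (x + y)), true) rfl
      rw [h] at ht; exact absurd ht (by simp)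
    · rfl

theorem pairsBreak_snd_true (money : Int) (S : List Int) (st : Int × Bool)
    (h : st.2 = true) : (pairsBreak money S st).2 = true := by
  induction S generalizing st with
  | nil => exact h
  | cons x xs ih => exact ih _ (rowBreak_snd_true money x xs st h)

theorem pairsBreak_of_snd_false (money : Int) (S : List Int) (st : Int × Bool)
    (h : (pairsBreak money S st).2 = false) : pairsBreak money S st = st := by
  induction S generalizing st with
  | nil => rfl
  | cons x xs ih =>
    have h' : (pairsBreak money xs (rowBreak money x xs st)).2 = false := h
    have hrow : (rowBreak money x xs st).2 = false := by
      by_contra hb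
      have := pairsBreak_snd_true money xs (rowBreak money x xs st) (by simpa using hb)
      rw [show pairsBreak money xs (rowBreak money x xs st) = pairsBreak money (x :: xs) st from rfl] at this
      simp [h] at this
    calc pairsBreak money (x :: xs) st
        = pairsBreak money xs (rowBreak money x xs st) := rfl
      _ = rowBreak money x xs st := ih _ (by rw [rowBreak_of_snd_false money x xs st hrow] at h' ⊢; exact h')
      _ = st := rowBreak_of_snd_false money x xs st hrow

theorem rowBreak_fst (money x : Int) (ys : List Int) (hp : ys.Pairwise (· ≤ ·)) :
    ∀ st : Int × Bool, (rowBreak money x ys st).1 = specRow money x ys st.1 := by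
  induction ys with
  | nil => intro st; rfl
  | cons y ys ih =>
    intro st
    rw [specRow_cons]
    unfold rowBreak
    split_ifs with hf
    · exact ih hp.of_cons (min st.1 (money - (x + y)), true)
    · rw [specRow_of_infeasible money x ys st.1
        (fun z hz => by have := (List.pairwise_cons.mp hp).1 z hz; omega)]

theorem pairsBreak_fst (money : Int) (S : List Int) (hp : S.Pairwise (· ≤ ·)) :
    ∀ st : Int × Bool, (pairsBreak money S st).1 = specPairs money S st.1 := by
  induction S with
  | nil => intro st; rfl
  | cons x xs ih =>
    intro st
    show (pairsBreak money xs (rowBreak money x xs st)).1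
        = specPairs money xs (specRow money x xs st.1)
    rw [ih hp.of_cons, rowBreak_fst money x xs hp.of_cons]

-- A's inner loop is rowBreak on the suffix
theorem innerA_eq (S : List Int) (money x : Int) :
    ∀ fuel (j : Int) (st : Int × Bool), ((S.length : Int) - j).toNat = fuel → 0 ≤ j →
    innerA S money x (S.length : Int) j st = rowBreak money x (S.drop j.toNat) st := by
  intro fuel
  induction fuel with
  | zero =>
    intro j st hfuel hj
    have hjl : (S.length : Int) ≤ j := by omega
    unfold innerA
    rw [dif_neg (by omega), List.drop_of_length_le (by omega)]
    rfl
  | succ fuel ih =>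
    intro j st hfuel hj
    have hjl : j < (S.length : Int) := by omega
    have hlt : j.toNat < S.length := by omega
    have hget : PySem.List.pyGetD S j 0 = S[j.toNat] :=
      PySem.List.pyGetD_eq_getElem S 0 hj (by omega)
    unfold innerA
    rw [dif_pos hjl, List.drop_eq_getElem_cons hlt]
    show (if x + PySem.List.pyGetD S j 0 ≤ money then
            innerA S money x (S.length : Int) (j + 1)
              (min st.1 (money - (x + PySem.List.pyGetD S j 0)), true)
          else st)
        = rowBreak money x (S[j.toNat] :: S.drop (j.toNat + 1)) st
    rw [hget]
    unfold rowBreak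
    split_ifs with hf
    · rw [ih (j + 1) _ (by omega) (by omega), show (j + 1).toNat = j.toNat + 1 by omega]
    · rfl

-- A's outer fold over range(k, n-1) is pairsBreak on the suffix
theorem foldA_eq (S : List Int) (money : Int) :
    ∀ fuel (k : Int) (st : Int × Bool), ((S.length : Int) - 1 - k).toNat = fuel → 0 ≤ k →
    (PySem.List.pyRange k ((S.length : Int) - 1) 1).foldl
        (fun st i => innerA S money (PySem.List.pyGetD S i 0) (S.length : Int) (i + 1) st) st
      = pairsBreak money (S.drop k.toNat) st := by
  intro fuel
  induction fuel with
  | zero =>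
    intro k st hfuel hk
    rw [PySem.List.pyRange_one_eq_nil (by omega)]
    rcases hdrop : S.drop k.toNat with _ | ⟨x, xs⟩
    · rfl
    · have hlen : (S.drop k.toNat).length ≤ 1 := by
        rw [List.length_drop]; omega
      rw [hdrop] at hlen
      simp at hlen
      subst hlen
      rfl
  | succ fuel ih =>
    intro k st hfuel hk
    have hkl : k < (S.length : Int) - 1 := by omega
    have hlt : k.toNat < S.length := by omega
    rw [PySem.List.pyRange_one_cons (by omega), List.foldl_cons]
    have hget : PySem.List.pyGetD S k 0 = S[k.toNat] :=
      PySem.List.pyGetD_eq_getElem S 0 hk (by omega)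
    rw [hget, innerA_eq S money _ ((S.length : Int) - (k + 1)).toNat (k + 1) st rfl (by omega),
        show (k + 1).toNat = k.toNat + 1 by omega,
        ih (k + 1) _ (by omega) (by omega),
        show (k + 1).toNat = k.toNat + 1 by omega]
    conv_rhs => rw [List.drop_eq_getElem_cons hlt]
    rfl

-- ===== B-side: two-pointer correctness =====

theorem tpLoop_eq (S : List Int) (money : Int) (hp : S.Pairwise (· ≤ ·)) :
    ∀ fuel (l r a : Int), (r - l).toNat = fuel → 0 ≤ l → r < (S.length : Int) →
    tpLoop S money l r a = specPairs money ((S.drop l.toNat).take (r - l + 1).toNat) a := by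
  intro fuel
  induction fuel with
  | zero =>
    intro l r a hfuel hl hr
    unfold tpLoop
    rw [dif_neg (by omega)]
    rcases lt_or_ge r l with hlt | hge
    · rw [show (r - l + 1).toNat = 0 by omega]; rfl
    · have hrl : r = l := by omega
      subst hrl
      rw [show (r - r + 1).toNat = 1 by omega]
      rcases htake : (S.drop r.toNat).take 1 with _ | ⟨x, xs⟩
      · rfl
      · have : xs = [] := by
          have := List.length_take_le 1 (S.drop r.toNat)
          rw [htake] at this; simp at this; exact this
        subst this; rfl
  | succ fuel ih =>
    intro l r a hfuel hl hr
    have hlr : l < r := by omega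
    have hlN : l.toNat < S.length := by omega
    have hrN : r.toNat < S.length := by omega
    have hWcons : (S.drop l.toNat).take (r - l + 1).toNat
        = S[l.toNat] :: ((S.drop (l.toNat + 1)).take (r - l).toNat) := by
      rw [List.drop_eq_getElem_cons hlN, show (r - l + 1).toNat = (r - l).toNat + 1 by omega,
          List.take_succ_cons]
    have hpW : ((S.drop l.toNat).take (r - l + 1).toNat).Pairwise (· ≤ ·) :=
      List.Pairwise.sublist ((List.take_sublist _ _).trans (List.drop_sublist _ _)) hp
    have hpT : ((S.drop (l.toNat + 1)).take (r - l).toNat).Pairwise (· ≤ ·) := (hWcons ▸ hpW).of_cons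
    have hgl : PySem.List.pyGetD S l 0 = S[l.toNat] :=
      PySem.List.pyGetD_eq_getElem S 0 hl (by omega)
    have hgr : PySem.List.pyGetD S r 0 = S[r.toNat] :=
      PySem.List.pyGetD_eq_getElem S 0 (by omega) (by omega)
    -- the tail window ends in S[r]
    have htail : (S.drop (l.toNat + 1)).take (r - l).toNat
        = (S.drop (l.toNat + 1)).take ((r - l).toNat - 1) ++ [S[r.toNat]] := by
      have hidx : l.toNat + 1 + ((r - l).toNat - 1) = r.toNat := by omega
      have hlen : (r - l).toNat - 1 < (S.drop (l.toNat + 1)).length := by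
        rw [List.length_drop]; omega
      rw [show (r - l).toNat = ((r - l).toNat - 1) + 1 by omega, List.take_add_one,
          List.getElem?_drop, hidx, List.getElem?_eq_getElem hrN]
      rfl
    unfold tpLoop
    rw [dif_pos hlr, hgl, hgr]
    show (if S[l.toNat] + S[r.toNat] ≤ money then
            tpLoop S money (l + 1) r (min a (money - (S[l.toNat] + S[r.toNat])))
          else tpLoop S money l (r - 1) a)
        = specPairs money ((S.drop l.toNat).take (r - l + 1).toNat) a
    split_ifs with hf
    · -- affordable: the whole row of S[l] collapses to the pair (S[l], S[r])
      rw [ih (l + 1) r _ (by omega) (by omega) hr, hWcons,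
          show (l + 1).toNat = l.toNat + 1 by omega,
          show r - (l + 1) + 1 = r - l by ring]
      show specPairs money ((S.drop (l.toNat + 1)).take (r - l).toNat)
            (min a (money - (S[l.toNat] + S[r.toNat])))
          = specPairs money ((S.drop (l.toNat + 1)).take (r - l).toNat)
            (specRow money S[l.toNat] ((S.drop (l.toNat + 1)).take (r - l).toNat) a)
      rw [htail, specRow_last money S[l.toNat] S[r.toNat] _ (htail ▸ hpT) hf a]
    · -- unaffordable: no pair ending at S[r] is affordable
      have hge : ∀ z ∈ (S.drop (l.toNat + 1)).take ((r - l).toNat - 1), S[l.toNat] ≤ z :=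
        fun z hz => (List.pairwise_cons.mp (hWcons ▸ hpW)).1 z
          (htail ▸ List.mem_append_left _ hz)
      have hcond : ∀ z ∈ S[l.toNat] :: (S.drop (l.toNat + 1)).take ((r - l).toNat - 1),
          ¬ (z + S[r.toNat] ≤ money) := by
        intro z hz
        rcases List.mem_cons.mp hz with h1 | h2
        · omega
        · have := hge z h2; omega
      rw [ih l (r - 1) _ (by omega) hl (by omega), hWcons, htail,
          show r - 1 - l + 1 = r - l by ring,
          show S[l.toNat] :: ((S.drop (l.toNat + 1)).take ((r - l).toNat - 1) ++ [S[r.toNat]])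
            = (S[l.toNat] :: (S.drop (l.toNat + 1)).take ((r - l).toNat - 1)) ++ [S[r.toNat]] from rfl,
          specPairs_drop_last money S[r.toNat] _ hcond a,
          show (r - l).toNat = ((r - l).toNat - 1) + 1 by omega,
          List.drop_eq_getElem_cons hlN, List.take_succ_cons,
          show (r - l).toNat - 1 + 1 - 1 = (r - l).toNat - 1 by omega]

-- ===== VERDICT (by name: the statement is the Claim_ definition above) =====
theorem buyChocolates_spec : Claim_equal_buyChocolates := by
  unfold Claim_equal_buyChocolates
  intro prices money _
  unfold Spec_buyChocolates buyChocolates buyChocolates_alt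
  set S := PySem.List.sorted prices (fun v => v) false with hSdef
  have hp : S.Pairwise (· ≤ ·) := PySem.List.sorted_pairwise prices _
  show (if (List.foldl (fun st i => innerA S money (PySem.List.pyGetD S i 0) (S.length : Int) (i + 1) st) (money, false) (PySem.List.pyRange 0 ((S.length : Int) - 1) 1)).2 = true
        then (List.foldl (fun st i => innerA S money (PySem.List.pyGetD S i 0) (S.length : Int) (i + 1) st) (money, false) (PySem.List.pyRange 0 ((S.length : Int) - 1) 1)).1
        else money)
      = tpLoop S money 0 ((S.length : Int) - 1) money
  rw [foldA_eq S money ((S.length : Int) - 1 - 0).toNat 0 (money, false) rfl le_rfl]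
  rw [tpLoop_eq S money hp ((S.length : Int) - 1 - 0).toNat 0 ((S.length : Int) - 1) money rfl le_rfl (by omega)]
  simp only [Int.toNat_zero, List.drop_zero]
  rw [show ((S.length : Int) - 1 - 0 + 1).toNat = S.length by omega, List.take_length]
  rcases hsnd : (pairsBreak money S (money, false)).2 with _ | _
  · have h1 := pairsBreak_fst money S hp (money, false)
    rw [pairsBreak_of_snd_false money S _ hsnd] at h1
    simpa using h1
  · simpa using pairsBreak_fst money S hp (money, false)
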